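-- pv_equiv track=rewrite | github.com/tomaszdurka/newsletter-printer | webtobitmap/text.py | break_words
-- ===== SOURCE A (Python) =====
-- def break_words(words):
--     for word in words:
--         if '-' in word:
--             parts = word.split('-')
--             for part in parts[:-1]:
--                 yield part + '-'
--             yield parts[-1]
--         else:
--             yield word
-- ===== SOURCE B (Python) =====
-- def break_words(words):
--     # Single character scan per word with a buffer; no split/slice and no hyphen test.
--     for word in words:
--         buf = ""
--         for ch in word:
--             if ch == '-':
--                 yield buf + '-'
--                 buf = ""
--             else:
--                 buf += ch
--         yield buf
-- ===== Notes on version B (the rewrite author's own statement) =====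
-- stated objective: simpler
-- what changed: Replaces the membership test + split('-') + slice loop with a single uniform character scan that flushes a buffer at each hyphen (the non-hyphen case needs no separate branch).
import Mathlib
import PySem

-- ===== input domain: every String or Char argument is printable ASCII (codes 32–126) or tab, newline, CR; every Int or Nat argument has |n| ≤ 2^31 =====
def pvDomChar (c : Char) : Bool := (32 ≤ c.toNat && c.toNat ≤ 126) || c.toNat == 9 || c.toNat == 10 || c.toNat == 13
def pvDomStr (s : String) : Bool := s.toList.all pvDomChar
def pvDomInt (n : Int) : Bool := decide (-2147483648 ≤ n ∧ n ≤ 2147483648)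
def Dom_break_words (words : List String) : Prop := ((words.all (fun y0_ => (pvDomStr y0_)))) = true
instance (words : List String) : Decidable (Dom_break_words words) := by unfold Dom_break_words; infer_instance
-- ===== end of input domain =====

-- B replaces A's membership-test + split('-') + slice loop with one uniform buffered
-- character scan per word (objective: simpler); return values proved equal on all inputs.


-- ===== PORT A =====
-- Per word: if '-' in word, parts = word.split('-'); yield part + '-' for parts[:-1]; yield parts[-1].
-- Strings are handled on the List Char side (PySem.Chars), exact per PYSEM.md; word.split('-') with the
-- non-empty literal separator is PySem.Chars.splitOn; parts is always non-empty, so parts[-1] never raises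
-- (the .getD [] default is unreachable).
def breakWordA (w : List Char) : List (List Char) :=
  if PySem.Chars.isIn ['-'] w then
    let parts := PySem.Chars.splitOn w ['-']
    (PySem.List.slice parts none (some (-1))).map (fun p => p ++ ['-']) ++
      [(PySem.List.pyGet? parts (-1)).getD []]
  else [w]

def break_words (words : List String) : List String :=
  words.flatMap (fun w => (breakWordA w.toList).map String.ofList)

-- ===== PORT B =====
-- Per word: a single buffered character scan; at '-' yield buffer + '-' and reset, at the end yield the buffer.
def scanWordB (buf : List Char) : List Char → List (List Char)
  | [] => [buf]
  | c :: rest => if c = '-' then (buf ++ ['-']) :: scanWordB [] rest else scanWordB (buf ++ [c]) rest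

def break_words_alt (words : List String) : List String :=
  words.flatMap (fun w => (scanWordB [] w.toList).map String.ofList)

-- ===== PRECONDITION & SPEC =====
def Spec_break_words (words : List String) (out : List String) : Prop := out = break_words_alt words
instance (words : List String) (out : List String) : Decidable (Spec_break_words words out) := by unfold Spec_break_words; infer_instance

-- ===== CLAIM (what is proved, stated in full; the proofs are below) =====
def Claim_equal_break_words : Prop := ∀ (words : List String), Dom_break_words words → Spec_break_words words (break_words words)

-- ===== LEMMAS AND PROOFS =====

-- Reference split on '-' as a plain structural recursion.
def splitD : List Char → List (List Char)
  | [] => [[]]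
  | c :: rest => if c = '-' then [] :: splitD rest else (splitD rest).modifyHead (c :: ·)

-- parts[:-1] each + '-', then the last part unchanged.
def hyph : List (List Char) → List (List Char)
  | [] => []
  | [p] => [p]
  | p :: ps => (p ++ ['-']) :: hyph ps

theorem modifyHead_nil_append (l : List (List Char)) : l.modifyHead (fun x => [] ++ x) = l := by
  cases l <;> simp

theorem modifyHead_id (l : List (List Char)) : l.modifyHead (fun x => x) = l := by
  cases l <;> simp

theorem splitD_ne_nil (cs : List Char) : splitD cs ≠ [] := by
  induction cs with
  | nil => simp [splitD]
  | cons c rest ih =>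
    simp only [splitD]
    split
    · simp
    · cases h : splitD rest with
      | nil => exact absurd h ih
      | cons p ps => simp

theorem go_spec (l : List Char) : ∀ (fuel : Nat) (cur : List Char) (acc : List (List Char)),
    l.length < fuel →
    PySem.Chars.splitOn.go ['-'] fuel l cur acc
      = acc.reverse ++ (splitD l).modifyHead (cur.reverse ++ ·) := by
  induction l with
  | nil =>
    intro fuel cur acc h
    match fuel with
    | fuel + 1 => simp [PySem.Chars.splitOn.go, splitD]
  | cons c rest ih =>
    intro fuel cur acc h
    match fuel with
    | fuel + 1 =>
      by_cases hc : c = '-'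
      · subst hc
        have hpre : List.isPrefixOf ['-'] ('-' :: rest) = true := by
          simp [List.isPrefixOf]
        rw [PySem.Chars.splitOn.go]
        rw [show List.drop (['-'] : List Char).length ('-' :: rest) = rest from rfl]
        simp only [List.length_cons] at h
        rw [ih fuel [] (cur.reverse :: acc) (by omega)]
        cases hs : splitD rest with
        | nil => exact absurd hs (splitD_ne_nil rest)
        | cons p ps => simp [splitD, hs]
      · have hpre : List.isPrefixOf ['-'] (c :: rest) = false := by
          simp [List.isPrefixOf]; exact fun h => absurd h.symm hc
        rw [PySem.Chars.splitOn.go]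
        simp only [hpre, Bool.false_eq_true, if_false]
        simp only [List.length_cons] at h
        rw [ih fuel (c :: cur) acc (by omega)]
        cases hs : splitD rest with
        | nil => exact absurd hs (splitD_ne_nil rest)
        | cons p ps => simp [splitD, hs, hc]

theorem splitOn_eq_splitD (cs : List Char) : PySem.Chars.splitOn cs ['-'] = splitD cs := by
  have h := go_spec cs (cs.length + 1) [] [] (by omega)
  simpa [PySem.Chars.splitOn, modifyHead_id] using h

theorem scan_eq (cs : List Char) : ∀ buf, scanWordB buf cs = hyph ((splitD cs).modifyHead (buf ++ ·)) := by
  induction cs with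
  | nil => intro buf; simp [scanWordB, splitD, hyph]
  | cons c rest ih =>
    intro buf
    by_cases hc : c = '-'
    · subst hc
      cases hs : splitD rest with
      | nil => exact absurd hs (splitD_ne_nil rest)
      | cons p ps =>
        simp only [scanWordB, if_pos, splitD, ih, hs, List.modifyHead_cons]
        cases ps <;> simp [hyph]
    · cases hs : splitD rest with
      | nil => exact absurd hs (splitD_ne_nil rest)
      | cons p ps =>
        simp only [scanWordB, hc, if_false, ih, splitD, hs, List.modifyHead_cons]
        simp [List.append_assoc]

theorem slice_neg_one (p : List Char) (ps : List (List Char)) :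
    PySem.List.slice (p :: ps) none (some (-1)) = (p :: ps).dropLast := by
  simp only [PySem.List.slice, PySem.List.clampIdx, List.length_cons, List.drop_zero,
    List.dropLast_eq_take]
  rw [if_pos (by omega : (-1:Int) < 0), if_neg (by omega : ¬(((ps.length + 1 : Nat):Int) + -1 < 0))]
  congr 1
  omega

theorem pyGet_neg_one (p : List Char) (ps : List (List Char)) :
    (PySem.List.pyGet? (p :: ps) (-1)).getD [] = (p :: ps).getLast (by simp) := by
  simp [PySem.List.pyGet?, PySem.List.pyIdx?, List.getLast_eq_getElem]
  rfl

theorem hyph_decomp (p : List Char) (ps : List (List Char)) :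
    ((p :: ps).dropLast).map (fun q => q ++ ['-']) ++ [(p :: ps).getLast (by simp)] = hyph (p :: ps) := by
  induction ps generalizing p with
  | nil => simp [hyph]
  | cons q qs ih =>
    rw [List.dropLast_cons_of_ne_nil (List.cons_ne_nil q qs), List.map_cons,
        List.getLast_cons (List.cons_ne_nil q qs)]
    have h2 : hyph (p :: q :: qs) = (p ++ ['-']) :: hyph (q :: qs) := rfl
    rw [h2, ← ih q, List.cons_append]

theorem splitD_no_hyph (w : List Char) (hm : '-' ∉ w) : splitD w = [w] := by
  induction w with
  | nil => simp [splitD]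
  | cons c rest ih =>
    have hc : c ≠ '-' := fun e => hm (e ▸ List.mem_cons_self)
    simp [splitD, hc, ih (fun h2 => hm (List.mem_cons_of_mem c h2))]

theorem breakWordA_eq_scan (w : List Char) : breakWordA w = scanWordB [] w := by
  rw [scan_eq w [], modifyHead_nil_append]
  unfold breakWordA
  by_cases h : PySem.Chars.isIn ['-'] w = true
  · rw [if_pos h, splitOn_eq_splitD]
    cases hs : splitD w with
    | nil => exact absurd hs (splitD_ne_nil w)
    | cons p ps =>
      change (PySem.List.slice (p :: ps) none (some (-1))).map (fun q => q ++ ['-']) ++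
          [(PySem.List.pyGet? (p :: ps) (-1)).getD []] = hyph (p :: ps)
      rw [slice_neg_one, pyGet_neg_one]
      exact hyph_decomp p ps
  · rw [if_neg h]
    have hmem : '-' ∉ w := by
      intro hm
      obtain ⟨s, t, rfl⟩ := List.append_of_mem hm
      exact h ((PySem.Chars.isIn_iff_infix ['-'] _).mpr ⟨s, t, by simp⟩)
    simp [splitD_no_hyph w hmem, hyph]

-- ===== VERDICT (by name: the statement is the Claim_ definition above) =====
theorem break_words_spec : Claim_equal_break_words := by
  intro words _
  unfold Spec_break_words break_words break_words_alt
  simp only [breakWordA_eq_scan]
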